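-- pv_equiv track=rewrite | github.com/itachi1010/hackerrank-competition-code- | main2.py | count_subsequences
-- ===== SOURCE A (Python) =====
-- MOD = 10 ** 9 + 7
--
-- def count_subsequences(t, n_values):
--     results = []
--
--     for N in n_values:
--         # Initialize counts for subsequences ending with odd and even numbers
--         odd_count = 1
--         even_count = 1
--
--         # Calculate counts for subsequences
--         for i in range(2, N + 1):
--             if i % 2 == 1:
--                 odd_count = (2 * odd_count) % MOD
--             else:
--                 even_count = (2 * even_count) % MOD
--
--         # Total count of valid subsequences
--         result = (odd_count + even_count) % MOD
--         results.append(result)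
--
--     return results
-- ===== SOURCE B (Python) =====
-- MOD = 10 ** 9 + 7
--
-- def count_subsequences(t, n_values):
--     # closed form: [2, N] holds (N-1)//2 odd and N//2 even numbers (0 when N < 2),
--     # so the answer is 2^(#odds) + 2^(#evens) mod MOD via fast modular pow.
--     return [(pow(2, max(0, (N - 1) // 2), MOD) + pow(2, max(0, N // 2), MOD)) % MOD
--             for N in n_values]
-- ===== Notes on version B (the rewrite author's own statement) =====
-- stated objective: faster
-- what changed: replaces the per-N doubling loop over range(2, N+1) with a closed-form count of odds/evens in [2,N] and Python's built-in fast modular pow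
import Mathlib
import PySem

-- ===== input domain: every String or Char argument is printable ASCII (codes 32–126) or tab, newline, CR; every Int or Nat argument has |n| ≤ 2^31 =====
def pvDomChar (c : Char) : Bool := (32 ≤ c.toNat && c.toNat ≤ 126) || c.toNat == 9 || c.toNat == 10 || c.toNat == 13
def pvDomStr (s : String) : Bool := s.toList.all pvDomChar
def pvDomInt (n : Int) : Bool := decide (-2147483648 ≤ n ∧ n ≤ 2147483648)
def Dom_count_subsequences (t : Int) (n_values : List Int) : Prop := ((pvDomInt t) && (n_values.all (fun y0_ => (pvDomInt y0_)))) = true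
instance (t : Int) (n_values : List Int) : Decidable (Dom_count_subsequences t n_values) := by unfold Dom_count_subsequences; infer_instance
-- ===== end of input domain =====

-- B replaces A's per-N doubling loop by a closed-form odd/even count and fast modular pow (faster).


-- module constant MOD = 10 ** 9 + 7 (shared by both Pythons)
def pvMOD : Int := 10 ^ 9 + 7

-- ===== PORT A =====
def count_subsequences (t : Int) (n_values : List Int) : List Int :=
  n_values.foldl (fun results N =>
    let st := (PySem.List.pyRange 2 (N + 1) 1).foldl
      (fun (st : Int × Int) i =>
        if PySem.Int.mod i 2 = 1 then (PySem.Int.mod (2 * st.1) pvMOD, st.2)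
        else (st.1, PySem.Int.mod (2 * st.2) pvMOD))
      (1, 1)
    results ++ [PySem.Int.mod (st.1 + st.2) pvMOD]) []

-- ===== PORT B =====
def count_subsequences_alt (t : Int) (n_values : List Int) : List Int :=
  n_values.map (fun N =>
    PySem.Int.mod
      (PySem.Int.powMod 2 (max 0 (PySem.Int.floordiv (N - 1) 2)).toNat pvMOD
        + PySem.Int.powMod 2 (max 0 (PySem.Int.floordiv N 2)).toNat pvMOD) pvMOD)

-- ===== PRECONDITION & SPEC =====
def Spec_count_subsequences (t : Int) (n_values : List Int) (out : List Int) : Prop := out = count_subsequences_alt t n_values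
instance (t : Int) (n_values : List Int) (out : List Int) : Decidable (Spec_count_subsequences t n_values out) := by unfold Spec_count_subsequences; infer_instance

-- ===== CLAIM (what is proved, stated in full; the proofs are below) =====
def Claim_equal_count_subsequences : Prop := ∀ (t : Int) (n_values : List Int), Dom_count_subsequences t n_values → Spec_count_subsequences t n_values (count_subsequences t n_values)

-- ===== LEMMAS AND PROOFS =====

-- doubling a power of two modulo pvMOD
lemma pv_double (a : Nat) : 2 * ((2 : Int) ^ a % pvMOD) % pvMOD = 2 ^ (a + 1) % pvMOD := by
  rw [pow_succ, Int.mul_emod (2 ^ a) 2 pvMOD]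
  have h2 : (2 : Int) % pvMOD = 2 := by norm_num [pvMOD]
  rw [h2, mul_comm]

-- A's inner loop over range(2, n+2) starting from powers of two yields powers of two:
-- the first component doubles once per odd element, the second once per even element.
lemma pv_loop_inv (n a b : Nat) :
    (PySem.List.pyRange 2 ((n : Int) + 2) 1).foldl
      (fun (st : Int × Int) i =>
        if PySem.Int.mod i 2 = 1 then (PySem.Int.mod (2 * st.1) pvMOD, st.2)
        else (st.1, PySem.Int.mod (2 * st.2) pvMOD))
      ((2 : Int) ^ a % pvMOD, (2 : Int) ^ b % pvMOD)
    = ((2 : Int) ^ (a + n / 2) % pvMOD, (2 : Int) ^ (b + (n + 1) / 2) % pvMOD) := by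
  induction n generalizing a b with
  | zero =>
      rw [show ((0 : Nat) : Int) + 2 = 2 by norm_num, PySem.List.pyRange_one_eq_nil (by norm_num)]
      simp
  | succ m ih =>
      have hsplit : PySem.List.pyRange 2 (((m + 1 : Nat) : Int) + 2) 1
          = PySem.List.pyRange 2 ((m : Int) + 2) 1 ++ [(m : Int) + 2] := by
        have := PySem.List.pyRange_one_succ_right (show (2:Int) ≤ (m : Int) + 2 by omega)
        push_cast at this ⊢
        convert this using 2
      rw [hsplit, List.foldl_append, ih]
      have hmod : PySem.Int.mod ((m : Int) + 2) 2 = (m : Int) % 2 := by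
        rw [PySem.Int.mod_eq_emod_of_pos (by norm_num)]
        omega
      by_cases hm : m % 2 = 1
      · have : PySem.Int.mod ((m : Int) + 2) 2 = 1 := by rw [hmod]; omega
        simp only [List.foldl_cons, List.foldl_nil, this]
        rw [show PySem.Int.mod (2 * ((2:Int) ^ (a + m / 2) % pvMOD)) pvMOD
              = 2 * ((2:Int) ^ (a + m / 2) % pvMOD) % pvMOD from
            PySem.Int.mod_eq_emod_of_pos (by norm_num [pvMOD]), pv_double]
        have h1 : a + m / 2 + 1 = a + (m + 1) / 2 := by omega
        have h2 : b + (m + 1) / 2 = b + (m + 1 + 1) / 2 := by omega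
        rw [h1, ← h2]
        simp
      · have : ¬ PySem.Int.mod ((m : Int) + 2) 2 = 1 := by rw [hmod]; omega
        simp only [List.foldl_cons, List.foldl_nil, if_neg this]
        rw [show PySem.Int.mod (2 * ((2:Int) ^ (b + (m + 1) / 2) % pvMOD)) pvMOD
              = 2 * ((2:Int) ^ (b + (m + 1) / 2) % pvMOD) % pvMOD from
            PySem.Int.mod_eq_emod_of_pos (by norm_num [pvMOD]), pv_double]
        have h1 : a + m / 2 = a + (m + 1) / 2 := by omega
        have h2 : b + (m + 1) / 2 + 1 = b + (m + 1 + 1) / 2 := by omega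
        rw [h1, h2]

-- per-element agreement: A's loop result for one N equals B's closed form
lemma pv_elem (N : Int) :
    PySem.Int.mod
      (((PySem.List.pyRange 2 (N + 1) 1).foldl
          (fun (st : Int × Int) i =>
            if PySem.Int.mod i 2 = 1 then (PySem.Int.mod (2 * st.1) pvMOD, st.2)
            else (st.1, PySem.Int.mod (2 * st.2) pvMOD)) (1, 1)).1
        + ((PySem.List.pyRange 2 (N + 1) 1).foldl
          (fun (st : Int × Int) i =>
            if PySem.Int.mod i 2 = 1 then (PySem.Int.mod (2 * st.1) pvMOD, st.2)
            else (st.1, PySem.Int.mod (2 * st.2) pvMOD)) (1, 1)).2) pvMOD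
    = PySem.Int.mod
        (PySem.Int.powMod 2 (max 0 (PySem.Int.floordiv (N - 1) 2)).toNat pvMOD
          + PySem.Int.powMod 2 (max 0 (PySem.Int.floordiv N 2)).toNat pvMOD) pvMOD := by
  by_cases hN : N ≤ 1
  · -- empty range: both sides are 2 % pvMOD
    rw [PySem.List.pyRange_one_eq_nil (by omega)]
    have h1 : PySem.Int.floordiv (N - 1) 2 ≤ 0 := by
      rw [PySem.Int.floordiv_eq_ediv_of_pos (by norm_num)]; omega
    have h2 : PySem.Int.floordiv N 2 ≤ 0 := by
      rw [PySem.Int.floordiv_eq_ediv_of_pos (by norm_num)]; omega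
    have e1 : (max 0 (PySem.Int.floordiv (N - 1) 2)).toNat = 0 := by omega
    have e2 : (max 0 (PySem.Int.floordiv N 2)).toNat = 0 := by omega
    rw [e1, e2]
    simp only [PySem.Int.powMod, pow_zero]
    norm_num [PySem.Int.mod, pvMOD]
  · -- N ≥ 2: write N = n + 1 with n ≥ 1 and use the loop invariant
    obtain ⟨n, hn⟩ : ∃ n : Nat, N = (n : Int) + 1 := ⟨(N - 1).toNat, by omega⟩
    subst hn
    have hrange : (n : Int) + 1 + 1 = (n : Int) + 2 := by ring
    have hstart : ((1 : Int), (1 : Int))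
        = ((2 : Int) ^ 0 % pvMOD, (2 : Int) ^ 0 % pvMOD) := by norm_num [pvMOD]
    rw [hrange, hstart, pv_loop_inv n 0 0]
    have e1 : (max 0 (PySem.Int.floordiv ((n : Int) + 1 - 1) 2)).toNat = n / 2 := by
      rw [show (n : Int) + 1 - 1 = (n : Int) by ring,
        PySem.Int.floordiv_eq_ediv_of_pos (by norm_num)]
      omega
    have e2 : (max 0 (PySem.Int.floordiv ((n : Int) + 1) 2)).toNat = (n + 1) / 2 := by
      rw [PySem.Int.floordiv_eq_ediv_of_pos (by norm_num)]
      omega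
    rw [e1, e2]
    simp only [PySem.Int.powMod,
      PySem.Int.mod_eq_emod_of_pos (show (0:Int) < pvMOD by norm_num [pvMOD])]
    rw [Nat.zero_add, Nat.zero_add]

-- ===== VERDICT (by name: the statement is the Claim_ definition above) =====
theorem count_subsequences_spec : Claim_equal_count_subsequences := by
  intro t n_values _
  unfold Spec_count_subsequences count_subsequences count_subsequences_alt
  rw [PySem.List.foldl_append_singleton_eq_map]
  exact List.map_congr_left (fun N _ => pv_elem N)
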